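-- pv_equiv track=rewrite | github.com/d4rth-f4der/Univer_python | Lab-04/Lab-04-x-10.py | find_first_element_greater_than
-- ===== SOURCE A (Python) =====
-- def find_first_element_greater_than(m: int) -> int:
--     a0 = 1
--     if m < a0: return a0
--
--     a1 = 1
--     an = 2 * a1 + 3 * a0
--     if m < an: return an
--
--     while m >= an:
--         a0 = a1
--         a1 = an
--         an = 2 * a1 + 3 * a0
--     return an
-- ===== SOURCE B (Python) =====
-- def find_first_element_greater_than(m: int) -> int:
--     # closed form: a_n = (3**n + (-1)**n) // 2 (roots 3 and -1 of x^2 = 2x + 3)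
--     p, sign = 1, 1          # p = 3**n, sign = (-1)**n
--     while True:
--         term = (p + sign) // 2
--         if m < term:
--             return term
--         p *= 3
--         sign = -sign
-- ===== Notes on version B (the rewrite author's own statement) =====
-- stated objective: alternative
-- what changed: B replaces the two-term recurrence state (a0,a1,an) and A's special-cased first two returns by the closed form a_n = (3^n + (-1)^n)//2, maintaining only a running power of three and an alternating sign in a single uniform loop.
import Mathlib
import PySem

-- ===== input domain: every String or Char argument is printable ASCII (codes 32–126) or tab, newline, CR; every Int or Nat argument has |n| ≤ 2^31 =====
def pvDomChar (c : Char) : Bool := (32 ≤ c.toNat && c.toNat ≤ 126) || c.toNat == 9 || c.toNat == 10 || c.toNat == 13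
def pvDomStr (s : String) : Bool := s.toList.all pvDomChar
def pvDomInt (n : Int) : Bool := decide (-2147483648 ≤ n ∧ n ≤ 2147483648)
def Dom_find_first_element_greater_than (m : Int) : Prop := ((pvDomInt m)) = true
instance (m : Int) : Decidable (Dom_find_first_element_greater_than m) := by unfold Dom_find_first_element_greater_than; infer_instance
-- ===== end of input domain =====

-- B replaces the recurrence state (a0,a1,an) by the closed form a_n = (3^n + (-1)^n)//2 (alternative decomposition, same cost).

-- ===== PORT A =====
-- A's while loop; the guard `0 < an + 3 * a1` only makes the recursion total (it holds on every state A's loop reaches).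
def pvLoopA (m a1 an : Int) : Int :=
  if _h1 : m ≥ an then
    if _h2 : 0 < an + 3 * a1 then pvLoopA m an (2 * an + 3 * a1) else an
  else an
termination_by (m + 1 - an).toNat
decreasing_by omega

def find_first_element_greater_than (m : Int) : Int :=
  let a0 : Int := 1
  if m < a0 then a0
  else
    let a1 : Int := 1
    let an := 2 * a1 + 3 * a0
    if m < an then an else pvLoopA m a1 an

-- ===== PORT B =====
-- B's `while True` loop; the guard `0 < p ∧ p ≤ 2*m+1` only makes the recursion total (it holds whenever B's loop continues).
def pvLoopB (m p sign : Int) : Int :=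
  let term := PySem.Int.floordiv (p + sign) 2
  if m < term then term
  else if _h : 0 < p ∧ p ≤ 2 * m + 1 then pvLoopB m (p * 3) (-sign) else term
termination_by (2 * m + 2 - p).toNat
decreasing_by omega

def find_first_element_greater_than_alt (m : Int) : Int :=
  pvLoopB m 1 1

-- ===== PRECONDITION & SPEC =====
def Spec_find_first_element_greater_than (m : Int) (out : Int) : Prop := out = find_first_element_greater_than_alt m
instance (m : Int) (out : Int) : Decidable (Spec_find_first_element_greater_than m out) := by unfold Spec_find_first_element_greater_than; infer_instance

-- ===== CLAIM (what is proved, stated in full; the proofs are below) =====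
def Claim_equal_find_first_element_greater_than : Prop := ∀ (m : Int), Dom_find_first_element_greater_than m → Spec_find_first_element_greater_than m (find_first_element_greater_than m)

-- ===== LEMMAS AND PROOFS =====

-- the sequence A iterates
def pvT : Nat → Int
  | 0 => 1
  | 1 => 1
  | (n+2) => 2 * pvT (n+1) + 3 * pvT n

lemma pvT_pos_pair : ∀ n : Nat, 1 ≤ pvT n ∧ 1 ≤ pvT (n+1) := by
  intro n
  induction n with
  | zero => constructor <;> simp [pvT]
  | succ k ih =>
    refine ⟨ih.2, ?_⟩
    show 1 ≤ pvT (k+2)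
    simp only [pvT]
    omega

lemma pvT_pos (n : Nat) : 1 ≤ pvT n := (pvT_pos_pair n).1

lemma two_pvT_pair : ∀ n : Nat, 2 * pvT n = 3^n + (-1:Int)^n ∧ 2 * pvT (n+1) = 3^(n+1) + (-1:Int)^(n+1) := by
  intro n
  induction n with
  | zero => constructor <;> norm_num [pvT]
  | succ k ih =>
    refine ⟨ih.2, ?_⟩
    show 2 * pvT (k+2) = 3^(k+2) + (-1:Int)^(k+2)
    simp only [pvT]
    linear_combination 2 * ih.2 + 3 * ih.1

lemma two_pvT (n : Nat) : 2 * pvT n = 3^n + (-1:Int)^n := (two_pvT_pair n).1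

lemma term_eq (n : Nat) : PySem.Int.floordiv ((3:Int)^n + (-1:Int)^n) 2 = pvT n := by
  rw [← two_pvT n, PySem.Int.floordiv_eq_ediv_of_pos (by norm_num)]
  exact Int.mul_ediv_cancel_left _ (by norm_num)

lemma sign_cases (n : Nat) : ((-1:Int))^n = 1 ∨ ((-1:Int))^n = -1 := by
  rcases Nat.even_or_odd n with h | h
  · exact Or.inl h.neg_one_pow
  · exact Or.inr h.neg_one_pow

lemma pow3_pos (n : Nat) : (0:Int) < 3^n := pow_pos (by norm_num) n

-- main bridging lemma: B's loop in state (3^(n+1), (-1)^(n+1)) agrees with A's loop in state (t n, t (n+1))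
lemma key : ∀ (k : Nat) (n : Nat) (m : Int), (2 * m + 2 - 3^(n+1)).toNat ≤ k →
    pvLoopB m ((3:Int)^(n+1)) ((-1:Int)^(n+1)) = pvLoopA m (pvT n) (pvT (n+1)) := by
  intro k
  induction k with
  | zero =>
    intro n m hk
    have hX := pow3_pos (n+1)
    have hS := sign_cases (n+1)
    have h2t := two_pvT (n+1)
    -- measure 0 forces m < pvT (n+1)
    have hm : m < pvT (n+1) := by omega
    rw [pvLoopB, pvLoopA]
    rw [term_eq (n+1)]
    simp [hm, not_le.mpr hm]
  | succ k ih =>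
    intro n m hk
    have hX := pow3_pos (n+1)
    have hS := sign_cases (n+1)
    have h2t := two_pvT (n+1)
    rw [pvLoopB, pvLoopA]
    rw [term_eq (n+1)]
    by_cases hm : m < pvT (n+1)
    · simp [hm, not_le.mpr hm]
    · have hmm : pvT (n+1) ≤ m := not_lt.mp hm
      have hgB : (0:Int) < 3^(n+1) ∧ (3:Int)^(n+1) ≤ 2 * m + 1 := ⟨hX, by omega⟩
      have hgA : (0:Int) < pvT (n+1) + 3 * pvT n := by
        have h1 := pvT_pos n; have h2 := pvT_pos (n+1); omega
      simp only [if_neg hm, dif_pos hgB, ge_iff_le, dif_pos hmm, dif_pos hgA]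
      have e1 : (3:Int)^(n+1) * 3 = 3^(n+2) := by ring
      have e2 : -(-1:Int)^(n+1) = (-1:Int)^(n+2) := by ring
      have e3 : 2 * pvT (n+1) + 3 * pvT n = pvT (n+2) := rfl
      rw [e1, e2, e3]
      refine ih (n+1) m ?_
      have e4 : (3:Int)^(n+2) = 3 * 3^(n+1) := by ring
      omega

lemma loopA_entry (m : Int) (h : (1:Int) ≤ m) :
    (if m < 5 then (5:Int) else pvLoopA m 1 5) = pvLoopA m 1 5 := by
  by_cases h5 : m < 5
  · rw [if_pos h5, pvLoopA, dif_neg (by omega)]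
  · rw [if_neg h5]

-- ===== VERDICT (by name: the statement is the Claim_ definition above) =====
theorem find_first_element_greater_than_spec : Claim_equal_find_first_element_greater_than := by
  unfold Claim_equal_find_first_element_greater_than Spec_find_first_element_greater_than
  intro m _
  unfold find_first_element_greater_than find_first_element_greater_than_alt
  by_cases h1 : m < 1
  · rw [if_pos h1, pvLoopB]
    norm_num [show PySem.Int.floordiv (1+1) 2 = 1 from by decide, h1]
  · have hm1 : (1:Int) ≤ m := not_lt.mp h1
    rw [if_neg h1]
    have hB : pvLoopB m 1 1 = pvLoopA m 1 5 := by
      rw [pvLoopB]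
      norm_num [show PySem.Int.floordiv (1+1) 2 = 1 from by decide, h1]
      rw [if_pos (show (0:Int) ≤ m by omega), pvLoopB]
      norm_num [show PySem.Int.floordiv (1*3 + -1) 2 = 1 from by decide, h1]
      rw [if_pos (show (3:Int) ≤ 2 * m + 1 by omega)]
      have hk := key (2 * m + 2 - 9).toNat 1 m (by norm_num)
      norm_num [show pvT 1 = 1 from rfl, show pvT 2 = 5 from by norm_num [pvT]] at hk
      exact hk
    rw [hB]
    simp only [show (2*(1:Int)+3*1) = 5 from by norm_num]
    exact loopA_entry m hm1
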